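-- pv_equiv track=rewrite | github.com/cirosantilli/project-euler-solutions | solvers/768.py | poly_pow
-- ===== SOURCE A (Python) =====
-- def poly_mul(a, b, limit):
--     """Multiply two polynomials (lists of ints) and truncate to degree <= limit."""
--     res = [0] * (min(limit, (len(a) - 1) + (len(b) - 1)) + 1)
--     for i, ai in enumerate(a):
--         if ai == 0:
--             continue
--         for j, bj in enumerate(b):
--             if bj == 0:
--                 continue
--             d = i + j
--             if d > limit:
--                 break
--             res[d] += ai * bj
--     return res
--
-- def poly_pow(base, exp, limit):
--     """Raise polynomial to integer power, truncating degrees > limit."""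
--     res = [1] + [0] * limit
--     cur = base[:]
--     e = exp
--     while e > 0:
--         if e & 1:
--             res = poly_mul(res, cur, limit)
--         e >>= 1
--         if e:
--             cur = poly_mul(cur, cur, limit)
--     return res
-- ===== SOURCE B (Python) =====
-- def poly_mul(a, b, limit):
--     """Truncated product: each output coefficient gathered over b's support."""
--     n = min(limit, len(a) + len(b) - 2)
--     nzb = [j for j in range(len(b)) if b[j]]
--     return [_coef(a, b, d, nzb) for d in range(n + 1)]
--
-- def _coef(a, b, d, nzb):
--     s = 0
--     for j in nzb:
--         if 0 <= d - j < len(a):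
--             s += a[d - j] * b[j]
--     return s
--
-- def _strip(p):
--     """Drop trailing zero coefficients."""
--     while p and p[-1] == 0:
--         p.pop()
--     return p
--
-- def _pow(base, exp, limit):
--     """Unpadded truncated power by recursive halving."""
--     if exp <= 0:
--         return [1]
--     half = _pow(base, exp // 2, limit)
--     res = _strip(poly_mul(half, half, limit))
--     if exp % 2:
--         res = _strip(poly_mul(res, base, limit))
--     return res
--
-- def poly_pow(base, exp, limit):
--     """Raise polynomial to integer power, truncating degrees > limit."""
--     p = _pow(base, exp, limit)
--     return p + [0] * (limit + 1 - len(p))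
-- ===== Notes on version B (the rewrite author's own statement) =====
-- stated objective: alternative
-- what changed: Replaces the iterative LSB-first square-and-multiply loop with a top-down recursive halving exponentiation over unpadded polynomials (trailing zeros stripped, final result padded once to degree limit), and replaces the scatter/accumulate truncated multiplication (nested enumerate, in-place += and an early break) by a per-coefficient gather over the support of the second factor; Pre_ excludes the empty base polynomial, on which the accidental lengths of the all-zero result depend on the multiplication order.
-- outside the precondition, e.g. on poly_pow([], 2, 3): A returns [0, 0, 0], B returns [0, 0, 0, 0]
import Mathlib
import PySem

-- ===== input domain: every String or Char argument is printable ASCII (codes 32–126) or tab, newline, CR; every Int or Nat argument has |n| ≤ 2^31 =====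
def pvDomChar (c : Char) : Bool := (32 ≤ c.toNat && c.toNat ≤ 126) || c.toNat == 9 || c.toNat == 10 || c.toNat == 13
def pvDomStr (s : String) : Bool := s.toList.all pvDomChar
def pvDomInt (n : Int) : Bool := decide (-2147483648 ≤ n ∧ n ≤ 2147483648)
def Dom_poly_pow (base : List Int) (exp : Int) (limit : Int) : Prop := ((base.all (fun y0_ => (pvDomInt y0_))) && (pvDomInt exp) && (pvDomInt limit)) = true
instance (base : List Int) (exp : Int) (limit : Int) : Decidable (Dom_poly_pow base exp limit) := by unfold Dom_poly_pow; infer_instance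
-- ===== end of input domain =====

-- B replaces A's iterative LSB-first square-and-multiply (with scatter/accumulate truncated
-- multiplication) by top-down recursive halving over unpadded polynomials (strip trailing zeros,
-- pad once at the end) with a per-coefficient gather multiplication; same cost, not claimed faster.

-- ===== PORT A =====
-- inner 'for j, bj in enumerate(b)' loop, carrying index j by hand (exact: break at d > limit,
-- 'continue' on bj == 0, in-place 'res[d] += ai*bj'; the set index is in range whenever Python's is)
def pvInnerA (limit : Int) (i : Nat) (ai : Int) : Nat → List Int → List Int → List Int
  | _, [], res => res
  | j, bj :: bs, res =>
    if bj = 0 then pvInnerA limit i ai (j+1) bs res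
    else if ((i + j : Nat) : Int) > limit then res
    else pvInnerA limit i ai (j+1) bs (res.set (i+j) (res.getD (i+j) 0 + ai * bj))

-- outer 'for i, ai in enumerate(a)' loop
def pvOuterA (limit : Int) (b : List Int) : Nat → List Int → List Int → List Int
  | _, [], res => res
  | i, ai :: rest, res =>
    if ai = 0 then pvOuterA limit b (i+1) rest res
    else pvOuterA limit b (i+1) rest (pvInnerA limit i ai 0 b res)

-- A's poly_mul: res = [0] * (min(limit, (len(a)-1)+(len(b)-1)) + 1), then the two loops
def pvMulA (a b : List Int) (limit : Int) : List Int :=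
  pvOuterA limit b 0 a
    (List.replicate (min limit (((a.length : Int) - 1) + ((b.length : Int) - 1)) + 1).toNat 0)

-- A's while-loop: 'while e > 0: if e & 1: res = mul(res,cur); e >>= 1; if e: cur = mul(cur,cur)'
def pvLoopA (limit : Int) (res cur : List Int) (e : Int) : List Int :=
  if h : 0 < e then
    let res' := if PySem.Int.band e 1 ≠ 0 then pvMulA res cur limit else res
    let e' := PySem.Int.floordiv e 2
    let cur' := if e' ≠ 0 then pvMulA cur cur limit else cur
    pvLoopA limit res' cur' e'
  else res
termination_by e.toNat
decreasing_by
  have h2 : PySem.Int.floordiv e 2 = e / 2 := PySem.Int.floordiv_eq_ediv_of_pos (by omega)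
  simp only [h2]; omega

-- 'res = [1] + [0]*limit' ([0]*limit is empty for limit < 0, as in Python); 'cur = base[:]'
def poly_pow (base : List Int) (exp : Int) (limit : Int) : List Int :=
  pvLoopA limit (1 :: List.replicate limit.toNat 0) base exp

-- ===== PORT B =====
-- nzb = [j for j in range(len(b)) if b[j]]
def pvNzb (b : List Int) : List Int :=
  (PySem.List.pyRange 0 (b.length : Int) 1).filter (fun j => PySem.List.pyGetD b j 0 != 0)

-- _coef(a, b, d, nzb): s = 0; for j in nzb: if 0 <= d-j < len(a): s += a[d-j]*b[j]
def pvCoefB (a b : List Int) (d : Int) (nzb : List Int) : Int :=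
  nzb.foldl (fun s j => if 0 ≤ d - j ∧ d - j < (a.length : Int)
    then s + PySem.List.pyGetD a (d - j) 0 * PySem.List.pyGetD b j 0 else s) 0

-- B's poly_mul: n = min(limit, len(a)+len(b)-2); [_coef(a,b,d,nzb) for d in range(n+1)]
def pvMulB (a b : List Int) (limit : Int) : List Int :=
  (PySem.List.pyRange 0 (min limit ((a.length : Int) + b.length - 2) + 1) 1).map
    (fun d => pvCoefB a b d (pvNzb b))

-- _strip(p): while p and p[-1] == 0: p.pop()
def pvStrip (p : List Int) : List Int :=
  if h : p.getLast? = some 0 then pvStrip p.dropLast else p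
termination_by p.length
decreasing_by
  have hne : p ≠ [] := by intro he; subst he; simp at h
  have hpos : 0 < p.length := List.length_pos_iff.mpr hne
  simp [List.length_dropLast]; omega

-- _pow: unpadded truncated power by recursive halving
def pvPowRec (base : List Int) (e : Int) (limit : Int) : List Int :=
  if h : e ≤ 0 then [1]
  else
    let half := pvPowRec base (PySem.Int.floordiv e 2) limit
    let sq := pvStrip (pvMulB half half limit)
    if PySem.Int.mod e 2 ≠ 0 then pvStrip (pvMulB sq base limit) else sq
termination_by e.toNat
decreasing_by
  have h2 : PySem.Int.floordiv e 2 = e / 2 := PySem.Int.floordiv_eq_ediv_of_pos (by omega)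
  simp only [h2]; omega

-- B's poly_pow: p = _pow(base, exp, limit); return p + [0] * (limit + 1 - len(p))
def poly_pow_alt (base : List Int) (exp : Int) (limit : Int) : List Int :=
  pvPowRec base exp limit ++
    List.replicate (limit + 1 - ((pvPowRec base exp limit).length : Int)).toNat 0

-- ===== PRECONDITION & SPEC =====
-- Pre_ excludes the empty base polynomial, on which the accidental list lengths of the all-zero
-- result depend on the order of the truncated multiplications (e.g. A gives [0,0,0] on ([],2,3)).
def Pre_poly_pow (base : List Int) (exp : Int) (limit : Int) : Prop := base ≠ []
instance (base : List Int) (exp : Int) (limit : Int) : Decidable (Pre_poly_pow base exp limit) := by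
  unfold Pre_poly_pow; infer_instance

def pvWitness_poly_pow : List Int × Int × Int := ([1, 2], 5, 4)

def Spec_poly_pow (base : List Int) (exp : Int) (limit : Int) (out : List Int) : Prop :=
  out = poly_pow_alt base exp limit
instance (base : List Int) (exp : Int) (limit : Int) (out : List Int) :
    Decidable (Spec_poly_pow base exp limit out) := by unfold Spec_poly_pow; infer_instance

-- ===== CLAIM (what is proved, stated in full; the proofs are below) =====
def Claim_equal_poly_pow : Prop := ∀ (base : List Int) (exp : Int) (limit : Int),
  Dom_poly_pow base exp limit → Pre_poly_pow base exp limit →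
  Spec_poly_pow base exp limit (poly_pow base exp limit)

-- ===== LEMMAS AND PROOFS =====

-- formal power series carrying a list's coefficients, and agreement of coefficients up to 'limit'
def pvFps (l : List Int) : PowerSeries ℤ := PowerSeries.mk (fun d => l.getD d 0)

def pvAgree (limit : Int) (p q : PowerSeries ℤ) : Prop :=
  ∀ d : ℕ, (d : Int) ≤ limit → (PowerSeries.coeff (R := ℤ) d) p = (PowerSeries.coeff (R := ℤ) d) q


-- coefficient of a list's power series
theorem pvFps_coeff (l : List Int) (d : ℕ) :
    (PowerSeries.coeff (R := ℤ) d) (pvFps l) = l.getD d 0 := PowerSeries.coeff_mk d _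

-- coefficient of a product of two list series, as a range sum
theorem pvCoeff_mul_lists (a b : List Int) (d : ℕ) :
    (PowerSeries.coeff (R := ℤ) d) (pvFps a * pvFps b) =
      ∑ i ∈ Finset.range (d + 1), a.getD i 0 * b.getD (d - i) 0 := by
  rw [PowerSeries.coeff_mul, Finset.Nat.sum_antidiagonal_eq_sum_range_succ_mk]
  simp [pvFps_coeff]

-- the product coefficient vanishes beyond the sum of degrees
theorem pvCoeff_mul_vanish (a b : List Int) (d : ℕ) (h : a.length + b.length ≤ d + 1) :
    (PowerSeries.coeff (R := ℤ) d) (pvFps a * pvFps b) = 0 := by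
  rw [pvCoeff_mul_lists]
  apply Finset.sum_eq_zero
  intro i hi
  rcases Nat.lt_or_ge i a.length with hia | hia
  · have : b.length ≤ d - i := by omega
    rw [List.getD_eq_default _ _ this, mul_zero]
  · rw [List.getD_eq_default _ _ hia, zero_mul]

-- pvAgree is reflexive, transported by multiplication and powers
theorem pvAgree_refl (limit : Int) (p : PowerSeries ℤ) : pvAgree limit p p := fun _ _ => rfl

theorem pvAgree_mul {limit : Int} {p p' q q' : PowerSeries ℤ}
    (h1 : pvAgree limit p p') (h2 : pvAgree limit q q') : pvAgree limit (p * q) (p' * q') := by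
  intro d hd
  rw [PowerSeries.coeff_mul, PowerSeries.coeff_mul]
  apply Finset.sum_congr rfl
  intro ij hij
  rw [Finset.mem_antidiagonal] at hij
  have hi : (ij.1 : Int) ≤ limit := by omega
  have hj : (ij.2 : Int) ≤ limit := by omega
  rw [h1 ij.1 hi, h2 ij.2 hj]

-- ---- B's multiplication ----

theorem pvFoldlIte {α : Type} (t : α → Int) (c : α → Prop) [DecidablePred c] :
    ∀ (l : List α) (s : Int),
      l.foldl (fun s k => if c k then s + t k else s) s
        = s + (l.map (fun k => if c k then t k else 0)).sum := by
  intro l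
  induction l with
  | nil => intro s; simp
  | cons x xs ih =>
    intro s
    rw [List.foldl_cons, List.map_cons, List.sum_cons]
    by_cases h : c x
    · rw [if_pos h, if_pos h, ih]; ring
    · rw [if_neg h, if_neg h, ih]; ring

theorem pvSumFilter (p : Int → Bool) (g : Int → Int) (hz : ∀ x, p x = false → g x = 0) :
    ∀ l : List Int, ((l.filter p).map g).sum = (l.map g).sum := by
  intro l
  induction l with
  | nil => rfl
  | cons x xs ih =>
    rw [List.filter_cons]
    by_cases h : p x
    · rw [if_pos h, List.map_cons, List.map_cons, List.sum_cons, List.sum_cons, ih]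
    · rw [if_neg h, List.map_cons, List.sum_cons, ih, hz x (by simpa using h), zero_add]

theorem pvSumExt (f : ℕ → ℤ) (M N : ℕ) (h : M ≤ N) (hz : ∀ k, M ≤ k → f k = 0) :
    ∑ k ∈ Finset.range N, f k = ∑ k ∈ Finset.range M, f k := by
  symm
  apply Finset.sum_subset (by intro x hx; simp only [Finset.mem_range] at hx ⊢; omega)
  intro x _ hx2
  exact hz x (by simpa using hx2)

theorem pvCoefB_eq (a b : List Int) (d : ℕ) :
    pvCoefB a b (d : Int) (pvNzb b) = ∑ i ∈ Finset.range (d + 1), a.getD i 0 * b.getD (d - i) 0 := by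
  rw [pvCoefB, pvNzb, pvFoldlIte, zero_add,
    pvSumFilter _ _ (fun x hx => by
      have hb0 : PySem.List.pyGetD b x 0 = 0 := by simpa using hx
      rw [hb0, mul_zero]
      split <;> rfl),
    PySem.List.pyRange_zero_natCast, List.map_map]
  have hterm : ∀ j ∈ List.range b.length,
      ((fun j => if 0 ≤ (d : Int) - j ∧ (d : Int) - j < (a.length : Int)
          then PySem.List.pyGetD a ((d : Int) - j) 0 * PySem.List.pyGetD b j 0 else 0) ∘
        (fun k : ℕ => (k : Int))) j
      = (if j ≤ d then a.getD (d - j) 0 * b.getD j 0 else 0) := by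
    intro j _
    simp only [Function.comp_apply]
    by_cases hjd : j ≤ d
    · rw [if_pos hjd]
      by_cases ha : d - j < a.length
      · rw [if_pos (by constructor <;> omega)]
        have hsub : ((d : Int) - (j : Int)) = ((d - j : ℕ) : Int) := by omega
        rw [hsub, PySem.List.pyGetD_natCast, PySem.List.pyGetD_natCast]
      · rw [if_neg (by omega), List.getD_eq_default a 0 (by omega), zero_mul]
    · rw [if_neg (by omega), if_neg hjd]
  rw [List.map_congr_left hterm]
  have hlist : ((List.range b.length).map
      (fun j => if j ≤ d then a.getD (d - j) 0 * b.getD j 0 else 0)).sum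
      = ∑ j ∈ Finset.range b.length, (if j ≤ d then a.getD (d - j) 0 * b.getD j 0 else 0) := rfl
  rw [hlist]
  calc ∑ j ∈ Finset.range b.length, (if j ≤ d then a.getD (d - j) 0 * b.getD j 0 else 0)
      = ∑ j ∈ Finset.range (max b.length (d + 1)),
          (if j ≤ d then a.getD (d - j) 0 * b.getD j 0 else 0) := by
        symm
        apply pvSumExt _ _ _ (le_max_left _ _)
        intro k hk
        rw [List.getD_eq_default b 0 hk, mul_zero]
        split <;> rfl
    _ = ∑ j ∈ Finset.range (d + 1), (if j ≤ d then a.getD (d - j) 0 * b.getD j 0 else 0) := by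
        apply pvSumExt _ _ _ (le_max_right _ _)
        intro k hk
        rw [if_neg (by omega)]
    _ = ∑ j ∈ Finset.range (d + 1), a.getD (d - j) 0 * b.getD (d - (d - j)) 0 := by
        apply Finset.sum_congr rfl
        intro j hj
        rw [Finset.mem_range] at hj
        rw [if_pos (by omega)]
        congr 2
        omega
    _ = ∑ i ∈ Finset.range (d + 1), a.getD i 0 * b.getD (d - i) 0 := by
        have := Finset.sum_range_reflect (fun i => a.getD i 0 * b.getD (d - i) 0) (d + 1)
        simpa using this

theorem pvMulB_length (a b : List Int) (limit : Int) :
    (pvMulB a b limit).length = (min limit ((a.length : Int) + b.length - 2) + 1).toNat := by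
  simp [pvMulB, PySem.List.length_pyRange_one]

theorem pvMulB_getD (a b : List Int) (limit : Int) (d : ℕ) (hd : d < (pvMulB a b limit).length) :
    (pvMulB a b limit).getD d 0 = pvCoefB a b (d : Int) (pvNzb b) := by
  rw [pvMulB] at hd ⊢
  rw [List.length_map, PySem.List.length_pyRange_one] at hd
  rw [← PySem.List.pyGetD_natCast]
  have hL : 0 < min limit ((a.length : Int) + b.length - 2) + 1 := by omega
  have hcast : min limit ((a.length : Int) + b.length - 2) + 1 =
      (((min limit ((a.length : Int) + b.length - 2) + 1).toNat : ℕ) : Int) := by omega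
  rw [hcast, PySem.List.pyGetD_map_pyRange (fun d => pvCoefB a b d (pvNzb b)) _ d 0 (by omega)]

theorem pvMulB_agree (a b : List Int) (limit : Int) :
    pvAgree limit (pvFps (pvMulB a b limit)) (pvFps a * pvFps b) := by
  intro d hd
  rw [pvFps_coeff]
  rcases Nat.lt_or_ge d (pvMulB a b limit).length with h | h
  · rw [pvMulB_getD a b limit d h, pvCoefB_eq, pvCoeff_mul_lists]
  · rw [List.getD_eq_default _ _ h]
    rw [pvMulB_length] at h
    refine (pvCoeff_mul_vanish a b d ?_).symm
    omega

-- ---- A's multiplication equals B's ----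

-- contribution of coefficients bs (sitting at indices j, j+1, …) paired with row i, at column d
def pvSideSum (i : Nat) : Nat → Nat → List Int → Int
  | _, _, [] => 0
  | j, d, bj :: bs => (if i + j = d then bj else 0) + pvSideSum i (j+1) d bs

theorem pvSideSum_of_lt (i : Nat) : ∀ (bs : List Int) (j d : Nat), d < i + j →
    pvSideSum i j d bs = 0 := by
  intro bs
  induction bs with
  | nil => intro j d _; rfl
  | cons bj bs ih =>
    intro j d h
    rw [pvSideSum, if_neg (by omega), ih (j+1) d (by omega), add_zero]

theorem pvSideSum_eq (i : Nat) : ∀ (bs : List Int) (j d : Nat),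
    pvSideSum i j d bs = if i + j ≤ d then bs.getD (d - i - j) 0 else 0 := by
  intro bs
  induction bs with
  | nil => intro j d; simp [pvSideSum]
  | cons bj bs ih =>
    intro j d
    rw [pvSideSum, ih (j+1)]
    rcases Nat.lt_trichotomy (i + j) d with h | h | h
    · rw [if_neg (by omega), if_pos (by omega), if_pos (by omega), zero_add]
      have : d - i - j = (d - i - (j+1)) + 1 := by omega
      rw [this, List.getD_cons_succ]
    · rw [if_pos (by omega), if_neg (by omega), if_pos (by omega), add_zero]
      have : d - i - j = 0 := by omega
      rw [this, List.getD_cons_zero]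
    · rw [if_neg (by omega), if_neg (by omega), if_neg (by omega), add_zero]

theorem pvGetD_set (l : List Int) (n : Nat) (v : Int) (d : Nat) (hn : n < l.length) :
    (l.set n v).getD d 0 = if d = n then v else l.getD d 0 := by
  rw [List.getD_eq_getElem?_getD, List.getD_eq_getElem?_getD, List.getElem?_set]
  rcases eq_or_ne n d with h | h
  · rw [if_pos h, if_pos hn, h, if_pos rfl]; rfl
  · rw [if_neg h, if_neg (Ne.symm h)]

theorem pvInnerA_spec (limit : Int) (i : Nat) (ai : Int) : ∀ (bs : List Int) (j : Nat)
    (res : List Int), (∀ d : ℕ, d < res.length → (d : Int) ≤ limit) →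
    (∀ k, k < bs.length → ((i + j + k : Nat) : Int) ≤ limit → i + j + k < res.length) →
    (pvInnerA limit i ai j bs res).length = res.length ∧
    ∀ d, d < res.length →
      (pvInnerA limit i ai j bs res).getD d 0 = res.getD d 0 + ai * pvSideSum i j d bs := by
  intro bs
  induction bs with
  | nil =>
    intro j res _ _
    exact ⟨rfl, fun d _ => by rw [pvSideSum, mul_zero, add_zero]; rfl⟩
  | cons bj bs ih =>
    intro j res hres hin
    by_cases hbj : bj = 0
    · rw [pvInnerA, if_pos hbj]
      obtain ⟨hl, he⟩ := ih (j+1) res hres (fun k hk hk2 => by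
        have := hin (k+1) (by simpa using hk) (by push_cast at hk2 ⊢; omega)
        omega)
      refine ⟨hl, fun d hd => ?_⟩
      rw [he d hd, pvSideSum, hbj]
      simp
    · rw [pvInnerA, if_neg hbj]
      by_cases hbr : ((i + j : Nat) : Int) > limit
      · rw [if_pos hbr]
        refine ⟨rfl, fun d hd => ?_⟩
        have : d < i + j := by
          have := hres d hd
          push_cast at hbr; omega
        rw [pvSideSum, if_neg (by omega), pvSideSum_of_lt i bs (j+1) d (by omega)]
        ring
      · rw [if_neg hbr]
        have hm : i + j < res.length := hin 0 (by simp) (by push_cast at hbr ⊢; omega)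
        set res' := res.set (i+j) (res.getD (i+j) 0 + ai * bj) with hres'
        have hlen' : res'.length = res.length := by rw [hres', List.length_set]
        obtain ⟨hl, he⟩ := ih (j+1) res' (fun d hd => hres d (by omega)) (fun k hk hk2 => by
          have := hin (k+1) (by simpa using hk) (by push_cast at hk2 ⊢; omega)
          omega)
        refine ⟨by omega, fun d hd => ?_⟩
        rw [he d (by omega), hres', pvGetD_set _ _ _ _ hm]
        rcases eq_or_ne d (i + j) with hdij | hdij
        · subst hdij
          rw [if_pos rfl, pvSideSum, if_pos rfl]
          ring
        · rw [if_neg hdij, pvSideSum, if_neg (by omega)]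
          ring

-- total contribution of rows as (at indices i, i+1, …) at column d
def pvFullSum (b : List Int) (d : Nat) : Nat → List Int → Int
  | _, [] => 0
  | i, ai :: rest => ai * pvSideSum i 0 d b + pvFullSum b d (i+1) rest

theorem pvOuterA_spec (limit : Int) (b : List Int) : ∀ (as : List Int) (i : Nat)
    (res : List Int), (∀ d : ℕ, d < res.length → (d : Int) ≤ limit) →
    (∀ (i' k : Nat), i ≤ i' → i' < i + as.length → k < b.length →
      ((i' + k : Nat) : Int) ≤ limit → i' + k < res.length) →
    (pvOuterA limit b i as res).length = res.length ∧
    ∀ d, d < res.length →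
      (pvOuterA limit b i as res).getD d 0 = res.getD d 0 + pvFullSum b d i as := by
  intro as
  induction as with
  | nil =>
    intro i res _ _
    exact ⟨rfl, fun d _ => by rw [pvFullSum, add_zero]; rfl⟩
  | cons ai rest ih =>
    intro i res hres hin
    by_cases hai : ai = 0
    · rw [pvOuterA, if_pos hai]
      obtain ⟨hl, he⟩ := ih (i+1) res hres (fun i' k h1 h2 h3 h4 =>
        hin i' k (by omega) (by simp at h2 ⊢; omega) h3 h4)
      refine ⟨hl, fun d hd => ?_⟩
      rw [he d hd, pvFullSum, hai, zero_mul, zero_add]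
    · rw [pvOuterA, if_neg hai]
      obtain ⟨hl1, he1⟩ := pvInnerA_spec limit i ai b 0 res hres (fun k hk hk2 =>
        hin i k (by omega) (by simp) hk (by simpa using hk2))
      obtain ⟨hl2, he2⟩ := ih (i+1) (pvInnerA limit i ai 0 b res)
        (fun d hd => hres d (by omega))
        (fun i' k h1 h2 h3 h4 => by
          rw [hl1]; exact hin i' k (by omega) (by simp at h2 ⊢; omega) h3 h4)
      refine ⟨by rw [hl2, hl1], fun d hd => ?_⟩
      rw [he2 d (by rw [hl1]; exact hd), he1 d hd, pvFullSum]
      ring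

theorem pvMulA_length (a b : List Int) (limit : Int) :
    (pvMulA a b limit).length =
      (min limit (((a.length : Int) - 1) + ((b.length : Int) - 1)) + 1).toNat := by
  rw [pvMulA]
  obtain ⟨hl, _⟩ := pvOuterA_spec limit b a 0
    (List.replicate (min limit (((a.length : Int) - 1) + ((b.length : Int) - 1)) + 1).toNat 0)
    (fun d hd => by
        have hml := min_le_left limit (((a.length : Int) - 1) + ((b.length : Int) - 1))
        rw [List.length_replicate] at hd
        rcases min_choice limit (((a.length : Int) - 1) + ((b.length : Int) - 1)) with h | h <;>
          rw [h] at hml hd <;> omega)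
    (fun i' k h1 h2 h3 h4 => by
      simp only [Nat.zero_add] at h2
      rw [List.length_replicate]
      rcases min_cases limit (((a.length : Int) - 1) + ((b.length : Int) - 1)) with ⟨h,h'⟩|⟨h,h'⟩ <;>
        rw [h] <;> omega)
  rw [hl, List.length_replicate]

theorem pvGetD_replicate (n : Nat) (d : Nat) : (List.replicate n (0:Int)).getD d 0 = 0 := by
  rw [List.getD_eq_getElem?_getD, List.getElem?_replicate]
  split <;> rfl

theorem pvMulA_getD (a b : List Int) (limit : Int) (d : ℕ) (hd : d < (pvMulA a b limit).length) :
    (pvMulA a b limit).getD d 0 = pvFullSum b d 0 a := by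
  rw [pvMulA_length] at hd
  rw [pvMulA]
  obtain ⟨hl, he⟩ := pvOuterA_spec limit b a 0
    (List.replicate (min limit (((a.length : Int) - 1) + ((b.length : Int) - 1)) + 1).toNat 0)
    (fun d hd => by
        have hml := min_le_left limit (((a.length : Int) - 1) + ((b.length : Int) - 1))
        rw [List.length_replicate] at hd
        rcases min_choice limit (((a.length : Int) - 1) + ((b.length : Int) - 1)) with h | h <;>
          rw [h] at hml hd <;> omega)
    (fun i' k h1 h2 h3 h4 => by
      simp only [Nat.zero_add] at h2
      rw [List.length_replicate]
      rcases min_cases limit (((a.length : Int) - 1) + ((b.length : Int) - 1)) with ⟨h,h'⟩|⟨h,h'⟩ <;>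
        rw [h] <;> omega)
  rw [he d (by rw [List.length_replicate]; exact hd), pvGetD_replicate, zero_add]

theorem pvFullSum_eq (b : List Int) (d : Nat) : ∀ (as : List Int) (i : Nat),
    pvFullSum b d i as = ∑ k ∈ Finset.range as.length,
      as.getD k 0 * (if i + k ≤ d then b.getD (d - i - k) 0 else 0) := by
  intro as
  induction as with
  | nil => intro i; simp [pvFullSum]
  | cons ai rest ih =>
    intro i
    rw [pvFullSum, ih (i+1), List.length_cons, Finset.sum_range_succ',
      add_comm (ai * pvSideSum i 0 d b)]
    congr 1
    · apply Finset.sum_congr rfl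
      intro k _
      rw [List.getD_cons_succ]
      have h1 : i + 1 + k = i + (k + 1) := by omega
      have h2 : d - (i + 1) - k = d - i - (k + 1) := by omega
      rw [h1, h2]
    · rw [List.getD_cons_zero, pvSideSum_eq]

theorem pvFullSum_coeff (a b : List Int) (d : ℕ) :
    pvFullSum b d 0 a = ∑ i ∈ Finset.range (d + 1), a.getD i 0 * b.getD (d - i) 0 := by
  rw [pvFullSum_eq]
  calc ∑ k ∈ Finset.range a.length, a.getD k 0 * (if 0 + k ≤ d then b.getD (d - 0 - k) 0 else 0)
      = ∑ k ∈ Finset.range a.length, a.getD k 0 * (if k ≤ d then b.getD (d - k) 0 else 0) :=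
        Finset.sum_congr rfl (fun k _ => by simp)
    _ = ∑ k ∈ Finset.range (max a.length (d+1)),
          a.getD k 0 * (if k ≤ d then b.getD (d - k) 0 else 0) := by
        symm
        apply pvSumExt _ _ _ (le_max_left _ _)
        intro k hk
        rw [List.getD_eq_default _ _ hk, zero_mul]
    _ = ∑ k ∈ Finset.range (d+1), a.getD k 0 * (if k ≤ d then b.getD (d - k) 0 else 0) := by
        apply pvSumExt _ _ _ (le_max_right _ _)
        intro k hk
        rw [if_neg (by omega), mul_zero]
    _ = ∑ i ∈ Finset.range (d + 1), a.getD i 0 * b.getD (d - i) 0 :=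
        Finset.sum_congr rfl (fun k hk => by rw [if_pos (by simp at hk; omega)])

theorem pvMulA_eq_pvMulB (a b : List Int) (limit : Int) :
    pvMulA a b limit = pvMulB a b limit := by
  have hlen : (pvMulA a b limit).length = (pvMulB a b limit).length := by
    rw [pvMulA_length, pvMulB_length]
    congr 2
    omega
  apply List.ext_getElem hlen
  intro d h1 h2
  calc (pvMulA a b limit)[d]
      = (pvMulA a b limit).getD d 0 := (List.getD_eq_getElem _ 0 h1).symm
    _ = (pvMulB a b limit).getD d 0 := by
        rw [pvMulA_getD a b limit d h1, pvMulB_getD a b limit d h2, pvFullSum_coeff, pvCoefB_eq]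
    _ = (pvMulB a b limit)[d] := List.getD_eq_getElem _ 0 h2

-- ---- unfolding equations for the two exponentiation loops ----

theorem pvLoopA_nonpos (limit : Int) (res cur : List Int) (e : Int) (h : ¬ 0 < e) :
    pvLoopA limit res cur e = res := by
  rw [pvLoopA, dif_neg h]

theorem pvLoopA_pos (limit : Int) (res cur : List Int) (e : Int) (h : 0 < e) :
    pvLoopA limit res cur e =
      pvLoopA limit (if PySem.Int.band e 1 ≠ 0 then pvMulA res cur limit else res)
        (if PySem.Int.floordiv e 2 ≠ 0 then pvMulA cur cur limit else cur)
        (PySem.Int.floordiv e 2) := by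
  rw [pvLoopA, dif_pos h]

-- ---- lengths and emptiness of products ----

theorem pvMulB_full_length (limit : Int) (hl : 0 ≤ limit) (x y : List Int)
    (hx : x.length = (limit + 1).toNat) (hy : y ≠ []) :
    (pvMulB x y limit).length = (limit + 1).toNat := by
  have hyl : 0 < y.length := List.length_pos_iff.mpr hy
  rw [pvMulB_length, hx]
  have h1 : (((limit + 1).toNat : ℕ) : Int) = limit + 1 := by omega
  rw [h1]
  have h2 : min limit (limit + 1 + (y.length : Int) - 2) = limit := min_eq_left (by omega)
  rw [h2]

theorem pvMulB_sq_nonempty (limit : Int) (hl : 0 ≤ limit) (x : List Int) (hx : x ≠ []) :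
    pvMulB x x limit ≠ [] := by
  have hxl : 0 < x.length := List.length_pos_iff.mpr hx
  have hlen := pvMulB_length x x limit
  intro hnil
  rw [hnil, List.length_nil] at hlen
  have hm : (0 : Int) ≤ min limit ((x.length : Int) + x.length - 2) := le_min hl (by omega)
  omega

theorem pvMulB_neg (limit : Int) (h : limit < 0) (a b : List Int) : pvMulB a b limit = [] := by
  have hlen := pvMulB_length a b limit
  have hm := min_le_left limit ((a.length : Int) + b.length - 2)
  have hz : (pvMulB a b limit).length = 0 := by omega
  exact List.eq_nil_of_length_eq_zero hz

-- ---- the identity list [1] + [0]*limit ----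

theorem pvId_length (limit : Int) (hl : 0 ≤ limit) :
    (1 :: List.replicate limit.toNat 0 : List Int).length = (limit + 1).toNat := by
  rw [List.length_cons, List.length_replicate]; omega

theorem pvId_agree (limit : Int) :
    pvAgree limit (pvFps (1 :: List.replicate limit.toNat 0)) 1 := by
  intro d _
  rw [pvFps_coeff, PowerSeries.coeff_one]
  cases d with
  | zero => rw [List.getD_cons_zero, if_pos rfl]
  | succ k => rw [List.getD_cons_succ, pvGetD_replicate, if_neg (Nat.succ_ne_zero k)]

-- ---- the invariant of A's binary-exponentiation loop ----

theorem pvLoopA_spec (limit : Int) (hl : 0 ≤ limit) :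
    ∀ (n : ℕ) (e : Int), e.toNat ≤ n → ∀ (res cur : List Int) (p q : PowerSeries ℤ),
      res.length = (limit + 1).toNat → cur ≠ [] →
      pvAgree limit (pvFps res) p → pvAgree limit (pvFps cur) q →
      (pvLoopA limit res cur e).length = (limit + 1).toNat ∧
      pvAgree limit (pvFps (pvLoopA limit res cur e)) (p * q ^ e.toNat) := by
  intro n
  induction n with
  | zero =>
    intro e he res cur p q hres hcur hp hq
    rw [pvLoopA_nonpos _ _ _ _ (by omega)]
    have h0 : e.toNat = 0 := by omega
    rw [h0, pow_zero, mul_one]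
    exact ⟨hres, hp⟩
  | succ n ih =>
    intro e he res cur p q hres hcur hp hq
    by_cases h0 : 0 < e
    · rw [pvLoopA_pos _ _ _ _ h0]
      have hfd : PySem.Int.floordiv e 2 = e / 2 :=
        PySem.Int.floordiv_eq_ediv_of_pos (by omega)
      have hband : PySem.Int.band e 1 = e % 2 := by
        rw [PySem.Int.band_one, PySem.Int.mod_eq_emod_of_pos (by omega)]
      rw [hfd, hband]
      simp only [pvMulA_eq_pvMulB]
      have hRlen : (if e % 2 ≠ 0 then pvMulB res cur limit else res).length
          = (limit + 1).toNat := by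
        by_cases hp2 : e % 2 ≠ 0
        · rw [if_pos hp2]; exact pvMulB_full_length limit hl res cur hres hcur
        · rw [if_neg hp2]; exact hres
      have hRagree : pvAgree limit (pvFps (if e % 2 ≠ 0 then pvMulB res cur limit else res))
          (p * q ^ (e % 2).toNat) := by
        by_cases hp2 : e % 2 ≠ 0
        · have h1 : (e % 2).toNat = 1 := by omega
          rw [if_pos hp2, h1, pow_one]
          exact fun d hd => (pvMulB_agree res cur limit d hd).trans (pvAgree_mul hp hq d hd)
        · have h1 : (e % 2).toNat = 0 := by omega
          rw [if_neg hp2, h1, pow_zero, mul_one]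
          exact hp
      by_cases hz : e / 2 = 0
      · have he1 : e = 1 := by omega
        rw [hz, pvLoopA_nonpos _ _ _ _ (by omega)]
        have h1 : (e % 2).toNat = e.toNat := by omega
        rw [h1] at hRagree
        exact ⟨hRlen, hRagree⟩
      · have hCne : (if e / 2 ≠ 0 then pvMulB cur cur limit else cur) ≠ [] := by
          rw [if_pos hz]; exact pvMulB_sq_nonempty limit hl cur hcur
        have hCagree : pvAgree limit
            (pvFps (if e / 2 ≠ 0 then pvMulB cur cur limit else cur)) (q * q) := by
          rw [if_pos hz]
          exact fun d hd => (pvMulB_agree cur cur limit d hd).trans (pvAgree_mul hq hq d hd)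
        obtain ⟨hL, hA⟩ := ih (e / 2) (by omega) _ _ (p * q ^ (e % 2).toNat) (q * q)
          hRlen hCne hRagree hCagree
        refine ⟨hL, ?_⟩
        have hpow : p * q ^ (e % 2).toNat * (q * q) ^ (e / 2).toNat = p * q ^ e.toNat := by
          rw [← sq, ← pow_mul, mul_assoc, ← pow_add]
          congr 2
          omega
        rw [hpow] at hA
        exact hA
    · rw [pvLoopA_nonpos _ _ _ _ h0]
      have hz : e.toNat = 0 := by omega
      rw [hz, pow_zero, mul_one]
      exact ⟨hres, hp⟩

-- ---- B's strip, pad, and recursive exponentiation ----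

theorem pvStrip_nil : pvStrip [] = [] := by
  rw [pvStrip]; simp

theorem pvDropLast_getD (p : List Int) (h : p.getLast? = some 0) (d : ℕ) :
    p.dropLast.getD d 0 = p.getD d 0 := by
  rcases List.eq_nil_or_concat p with rfl | ⟨q, x, rfl⟩
  · simp at h
  · rw [List.concat_eq_append] at h ⊢
    rw [List.getLast?_concat] at h
    have hx : x = 0 := by simpa using h
    subst hx
    rw [List.dropLast_concat]
    by_cases hd : d < q.length
    · rw [List.getD_eq_getElem?_getD, List.getD_eq_getElem?_getD,
        List.getElem?_append_left hd]
    · rw [List.getD_eq_default q 0 (by omega), List.getD_eq_getElem?_getD,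
        List.getElem?_append_right (by omega)]
      rcases Nat.eq_or_lt_of_le (Nat.le_of_not_lt hd) with he | he
      · rw [← he, Nat.sub_self]; rfl
      · rw [List.getElem?_eq_none (by simp; omega)]; rfl

theorem pvStrip_getD : ∀ (n : ℕ) (p : List Int), p.length ≤ n → ∀ d : ℕ,
    (pvStrip p).getD d 0 = p.getD d 0 := by
  intro n
  induction n with
  | zero =>
    intro p hp d
    have : p = [] := List.eq_nil_of_length_eq_zero (by omega)
    subst this
    rw [pvStrip_nil]
  | succ n ih =>
    intro p hp d
    by_cases h : p.getLast? = some 0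
    · have hne : p ≠ [] := by intro he; subst he; simp at h
      have hpos : 0 < p.length := List.length_pos_iff.mpr hne
      rw [pvStrip, dif_pos h, ih p.dropLast (by simp [List.length_dropLast]; omega) d,
        pvDropLast_getD p h d]
    · rw [pvStrip, dif_neg h]

theorem pvStrip_length_le : ∀ (n : ℕ) (p : List Int), p.length ≤ n →
    (pvStrip p).length ≤ p.length := by
  intro n
  induction n with
  | zero =>
    intro p hp
    have : p = [] := List.eq_nil_of_length_eq_zero (by omega)
    subst this
    rw [pvStrip_nil]
  | succ n ih =>
    intro p hp
    by_cases h : p.getLast? = some 0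
    · have hne : p ≠ [] := by intro he; subst he; simp at h
      have hpos : 0 < p.length := List.length_pos_iff.mpr hne
      rw [pvStrip, dif_pos h]
      have := ih p.dropLast (by simp [List.length_dropLast]; omega)
      simp [List.length_dropLast] at this ⊢
      omega
    · rw [pvStrip, dif_neg h]

theorem pvStrip_agree (limit : Int) (p : List Int) :
    pvAgree limit (pvFps (pvStrip p)) (pvFps p) := fun d _ => by
  rw [pvFps_coeff, pvFps_coeff, pvStrip_getD p.length p le_rfl d]

theorem pvPad_getD (p : List Int) (k d : ℕ) :
    (p ++ List.replicate k (0 : Int)).getD d 0 = p.getD d 0 := by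
  by_cases hd : d < p.length
  · rw [List.getD_eq_getElem?_getD, List.getD_eq_getElem?_getD, List.getElem?_append_left hd]
  · rw [List.getD_eq_default p 0 (by omega), List.getD_eq_getElem?_getD,
      List.getElem?_append_right (by omega), List.getElem?_replicate]
    split <;> rfl

theorem pvPowRec_nonpos (base : List Int) (e limit : Int) (h : e ≤ 0) :
    pvPowRec base e limit = [1] := by
  rw [pvPowRec, dif_pos h]

theorem pvPowRec_pos (base : List Int) (e limit : Int) (h : ¬ e ≤ 0) :
    pvPowRec base e limit =
      (if PySem.Int.mod e 2 ≠ 0 then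
        pvStrip (pvMulB (pvStrip (pvMulB (pvPowRec base (PySem.Int.floordiv e 2) limit)
          (pvPowRec base (PySem.Int.floordiv e 2) limit) limit)) base limit)
      else
        pvStrip (pvMulB (pvPowRec base (PySem.Int.floordiv e 2) limit)
          (pvPowRec base (PySem.Int.floordiv e 2) limit) limit)) := by
  rw [pvPowRec, dif_neg h]

theorem pvOne_agree (limit : Int) : pvAgree limit (pvFps [1]) 1 := by
  intro d _
  rw [pvFps_coeff, PowerSeries.coeff_one]
  cases d with
  | zero => rw [List.getD_cons_zero, if_pos rfl]
  | succ k => rw [List.getD_cons_succ, if_neg (Nat.succ_ne_zero k)]; rfl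

theorem pvMulB_length_le (a b : List Int) (limit : Int) (hl : 0 ≤ limit) :
    ((pvMulB a b limit).length : Int) ≤ limit + 1 := by
  have hml := min_le_left limit ((a.length : Int) + b.length - 2)
  rw [pvMulB_length]
  omega

theorem pvPowRec_spec (limit : Int) (hl : 0 ≤ limit) (base : List Int) :
    ∀ (n : ℕ) (e : Int), e.toNat ≤ n →
      ((pvPowRec base e limit).length : Int) ≤ limit + 1 ∧
      pvAgree limit (pvFps (pvPowRec base e limit)) (pvFps base ^ e.toNat) := by
  intro n
  induction n with
  | zero =>
    intro e he
    rw [pvPowRec_nonpos _ _ _ (by omega)]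
    have h0 : e.toNat = 0 := by omega
    rw [h0, pow_zero]
    exact ⟨by simp; omega, pvOne_agree limit⟩
  | succ n ih =>
    intro e he
    by_cases h0 : e ≤ 0
    · rw [pvPowRec_nonpos _ _ _ h0]
      have hz : e.toNat = 0 := by omega
      rw [hz, pow_zero]
      exact ⟨by simp; omega, pvOne_agree limit⟩
    · rw [pvPowRec_pos _ _ _ h0]
      have hfd : PySem.Int.floordiv e 2 = e / 2 :=
        PySem.Int.floordiv_eq_ediv_of_pos (by omega)
      have hmod : PySem.Int.mod e 2 = e % 2 := PySem.Int.mod_eq_emod_of_pos (by omega)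
      rw [hfd, hmod]
      obtain ⟨hhl, hha⟩ := ih (e / 2) (by omega)
      have hsql : ((pvStrip (pvMulB (pvPowRec base (e / 2) limit)
          (pvPowRec base (e / 2) limit) limit)).length : Int) ≤ limit + 1 := by
        have h1 := pvStrip_length_le (pvMulB (pvPowRec base (e / 2) limit)
          (pvPowRec base (e / 2) limit) limit).length _ le_rfl
        have h2 := pvMulB_length_le (pvPowRec base (e / 2) limit)
          (pvPowRec base (e / 2) limit) limit hl
        omega
      have hsqa : pvAgree limit (pvFps (pvStrip (pvMulB (pvPowRec base (e / 2) limit)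
          (pvPowRec base (e / 2) limit) limit))) (pvFps base ^ (2 * (e / 2).toNat)) := by
        intro d hd
        rw [two_mul, pow_add]
        exact (pvStrip_agree limit _ d hd).trans
          ((pvMulB_agree _ _ limit d hd).trans (pvAgree_mul hha hha d hd))
      by_cases hp2 : e % 2 ≠ 0
      · rw [if_pos hp2]
        refine ⟨?_, ?_⟩
        · have h1 := pvStrip_length_le (pvMulB (pvStrip (pvMulB (pvPowRec base (e / 2) limit)
            (pvPowRec base (e / 2) limit) limit)) base limit).length _ le_rfl
          have h2 := pvMulB_length_le (pvStrip (pvMulB (pvPowRec base (e / 2) limit)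
            (pvPowRec base (e / 2) limit) limit)) base limit hl
          omega
        · intro d hd
          have := (pvStrip_agree limit _ d hd).trans ((pvMulB_agree _ base limit d hd).trans
            (pvAgree_mul hsqa (pvAgree_refl limit (pvFps base)) d hd))
          rw [this]
          have hexp : 2 * (e / 2).toNat + 1 = e.toNat := by omega
          rw [← pow_succ, hexp]
      · rw [if_neg hp2]
        have hexp : 2 * (e / 2).toNat = e.toNat := by omega
        rw [hexp] at hsqa
        exact ⟨hsql, hsqa⟩

theorem pvAlt_length (limit : Int) (hl : 0 ≤ limit) (base : List Int) (e : Int) :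
    (poly_pow_alt base e limit).length = (limit + 1).toNat := by
  obtain ⟨hlen, _⟩ := pvPowRec_spec limit hl base e.toNat e le_rfl
  rw [poly_pow_alt, List.length_append, List.length_replicate]
  omega

theorem pvAlt_agree (limit : Int) (hl : 0 ≤ limit) (base : List Int) (e : Int) :
    pvAgree limit (pvFps (poly_pow_alt base e limit)) (pvFps base ^ e.toNat) := by
  obtain ⟨_, hagree⟩ := pvPowRec_spec limit hl base e.toNat e le_rfl
  intro d hd
  rw [pvFps_coeff, poly_pow_alt, pvPad_getD, ← pvFps_coeff]
  exact hagree d hd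

-- ---- negative limit: every product list is empty ----

theorem pvLoopA_negLimit (limit : Int) (h : limit < 0) :
    ∀ (n : ℕ) (e : Int), e.toNat ≤ n → 0 < e → ∀ (res cur : List Int),
      pvLoopA limit res cur e = [] := by
  intro n
  induction n with
  | zero => intro e he h0 res cur; exact absurd h0 (by omega)
  | succ n ih =>
    intro e he h0 res cur
    rw [pvLoopA_pos _ _ _ _ h0]
    have hfd : PySem.Int.floordiv e 2 = e / 2 :=
      PySem.Int.floordiv_eq_ediv_of_pos (by omega)
    have hband : PySem.Int.band e 1 = e % 2 := by
      rw [PySem.Int.band_one, PySem.Int.mod_eq_emod_of_pos (by omega)]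
    rw [hfd, hband]
    by_cases hz : e / 2 = 0
    · have he1 : e % 2 ≠ 0 := by omega
      rw [hz, pvLoopA_nonpos _ _ _ _ (by omega), if_pos he1, pvMulA_eq_pvMulB,
        pvMulB_neg limit h]
    · exact ih (e / 2) (by omega) (by omega) _ _

theorem pvPowRec_negLimit (limit : Int) (h : limit < 0) (base : List Int) (e : Int)
    (h0 : ¬ e ≤ 0) : pvPowRec base e limit = [] := by
  rw [pvPowRec_pos _ _ _ h0]
  by_cases hp2 : PySem.Int.mod e 2 ≠ 0
  · rw [if_pos hp2, pvMulB_neg limit h, pvStrip_nil]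
  · rw [if_neg hp2, pvMulB_neg limit h, pvStrip_nil]

theorem pvAlt_negLimit (limit : Int) (h : limit < 0) (base : List Int) (e : Int)
    (h0 : ¬ e ≤ 0) : poly_pow_alt base e limit = [] := by
  rw [poly_pow_alt, pvPowRec_negLimit limit h base e h0]
  have hz : (limit + 1 - ((([] : List Int)).length : Int)).toNat = 0 := by simp; omega
  rw [hz]
  rfl

-- ---- agreeing lists of equal full length are equal ----

theorem pvLists_eq (limit : Int) (x y : List Int) (hx : x.length = (limit + 1).toNat)
    (hy : y.length = (limit + 1).toNat) (p : PowerSeries ℤ)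
    (ha : pvAgree limit (pvFps x) p) (hb : pvAgree limit (pvFps y) p) : x = y := by
  apply List.ext_getElem (by omega)
  intro d h1 h2
  have hd : (d : Int) ≤ limit := by omega
  have heq := (ha d hd).trans (hb d hd).symm
  rw [pvFps_coeff, pvFps_coeff] at heq
  calc x[d] = x.getD d 0 := (List.getD_eq_getElem _ 0 h1).symm
    _ = y.getD d 0 := heq
    _ = y[d] := List.getD_eq_getElem _ 0 h2

theorem poly_pow_spec : Claim_equal_poly_pow := by
  intro base exp limit _ hpre
  unfold Pre_poly_pow at hpre
  unfold Spec_poly_pow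
  by_cases h0 : exp ≤ 0
  · rw [poly_pow, pvLoopA_nonpos _ _ _ _ (by omega), poly_pow_alt,
      pvPowRec_nonpos _ _ _ h0]
    have hz : (limit + 1 - ((([1] : List Int)).length : Int)).toNat = limit.toNat := by
      simp
    rw [hz]
    rfl
  · by_cases hneg : limit < 0
    · rw [poly_pow, pvLoopA_negLimit limit hneg exp.toNat exp le_rfl (by omega) _ _,
        pvAlt_negLimit limit hneg base exp h0]
    · have hl : 0 ≤ limit := by omega
      obtain ⟨hal, haa⟩ := pvLoopA_spec limit hl exp.toNat exp le_rfl
        (1 :: List.replicate limit.toNat 0) base 1 (pvFps base)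
        (pvId_length limit hl) hpre (pvId_agree limit) (pvAgree_refl _ _)
      rw [one_mul] at haa
      rw [poly_pow]
      exact pvLists_eq limit _ _ hal (pvAlt_length limit hl base exp)
        (pvFps base ^ exp.toNat) haa (pvAlt_agree limit hl base exp)
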